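-- pv_equiv track=rewrite | github.com/Jmanuel2099/ide-searchs | server/cannibals_vs_monks/searchs/game_metrics.py | get_boat_at_left_new_states
-- ===== SOURCE A (Python) =====
-- def get_boat_at_left_new_states(game_state):
--     """
--     From a current state that has the boat on the left,
--     obtains the possible states that can be generated from the current state.
--     """
--     new_states = []
--     for missionary in range(3 - game_state[0] + 1):
--         for cannibal in range(3 - game_state[1] + 1):
--             if missionary + cannibal < 1 or missionary + cannibal > 2:
--                 continue
--             new_missionary = game_state[0] + missionary
--             new_cannibal =  game_state[1] + cannibal
--             new_state = (new_missionary, new_cannibal, 'right', new_missionary + new_cannibal)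
--             if 0 < new_state[0] < new_state[1]:
--                 continue
--             if 0 < 3 - new_state[0] < 3 - new_state[1]:
--                 continue
--             new_states.append(new_state)
--     return new_states
-- ===== SOURCE B (Python) =====
-- def get_boat_at_left_new_states(game_state):
--     """Recursive descent over boat loads in decreasing lexicographic order,
--     prepending valid successor states to an accumulator (boat capacity 2)."""
--     def bank_ok(mm, cc):
--         # a river bank with mm missionaries and cc cannibals is not overrun
--         return not (0 < mm < cc)
--
--     def go(dm, dc, acc):
--         if dm < 0:
--             return acc
--         if dc < 0 or dm + dc < 1:
--             return go(dm - 1, 2 - (dm - 1), acc)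
--         m, c = game_state[0] + dm, game_state[1] + dc
--         if m <= 3 and c <= 3 and bank_ok(m, c) and bank_ok(3 - m, 3 - c):
--             acc = [(m, c, 'right', m + c)] + acc
--         return go(dm, dc - 1, acc)
--
--     return go(2, 0, [])
-- ===== Notes on version B (the rewrite author's own statement) =====
-- stated objective: alternative
-- what changed: Replaced the two data-dependent nested forward range loops (with their sum-window continue and two inline balance filters) by an explicit recursive descent that walks boat loads in decreasing lexicographic order with arithmetically derived bounds, prepending valid successors to an accumulator, and factors both balance filters into one bank_ok predicate applied to each bank.
import Mathlib
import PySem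

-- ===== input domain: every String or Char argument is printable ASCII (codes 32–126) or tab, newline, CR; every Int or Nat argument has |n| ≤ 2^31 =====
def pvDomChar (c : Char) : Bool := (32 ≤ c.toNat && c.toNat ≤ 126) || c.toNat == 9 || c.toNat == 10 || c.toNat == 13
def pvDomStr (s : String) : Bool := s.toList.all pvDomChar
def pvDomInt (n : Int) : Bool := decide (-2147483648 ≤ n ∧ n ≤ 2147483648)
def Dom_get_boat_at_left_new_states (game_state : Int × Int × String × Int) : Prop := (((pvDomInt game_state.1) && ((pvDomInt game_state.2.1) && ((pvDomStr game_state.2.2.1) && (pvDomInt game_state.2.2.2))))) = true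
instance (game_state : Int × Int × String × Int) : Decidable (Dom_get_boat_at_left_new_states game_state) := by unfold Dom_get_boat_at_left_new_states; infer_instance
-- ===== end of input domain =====

-- B replaces A's nested forward range loops by a recursive descent that walks boat loads in
-- decreasing lexicographic order, prepending valid successors, with both balance filters
-- factored into one bank_ok predicate applied to each bank (objective: alternative).

-- ===== PORT A =====
def get_boat_at_left_new_states (game_state : Int × Int × String × Int) : List (Int × Int × String × Int) :=
  (PySem.List.pyRange 0 (3 - game_state.1 + 1) 1).foldl (fun new_states missionary =>
    (PySem.List.pyRange 0 (3 - game_state.2.1 + 1) 1).foldl (fun new_states cannibal =>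
      if missionary + cannibal < 1 ∨ missionary + cannibal > 2 then new_states
      else
        let new_missionary := game_state.1 + missionary
        let new_cannibal := game_state.2.1 + cannibal
        let new_state : Int × Int × String × Int :=
          (new_missionary, new_cannibal, "right", new_missionary + new_cannibal)
        if 0 < new_state.1 ∧ new_state.1 < new_state.2.1 then new_states
        else if 0 < 3 - new_state.1 ∧ 3 - new_state.1 < 3 - new_state.2.1 then new_states
        else new_states ++ [new_state]) new_states) []

-- ===== PORT B =====
-- a river bank with mm missionaries and cc cannibals is not overrun
abbrev pvBankOk (mm cc : Int) : Prop := ¬(0 < mm ∧ mm < cc)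

-- recursive descent over boat loads (dm, dc) in decreasing lexicographic order;
-- the fuel argument only makes the recursion structural: the walk takes exactly
-- 9 calls from (dm, dc) = (2, 0), so fuel 9 is never exhausted
def pvGo (m0 c0 : Int) (fuel : Nat) (dm dc : Int) (acc : List (Int × Int × String × Int)) :
    List (Int × Int × String × Int) :=
  match fuel with
  | 0 => acc
  | fuel + 1 =>
    if dm < 0 then acc
    else if dc < 0 ∨ dm + dc < 1 then pvGo m0 c0 fuel (dm - 1) (2 - (dm - 1)) acc
    else
      let m := m0 + dm
      let c := c0 + dc
      let acc' := if m ≤ 3 ∧ c ≤ 3 ∧ pvBankOk m c ∧ pvBankOk (3 - m) (3 - c) then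
          [(m, c, "right", m + c)] ++ acc else acc
      pvGo m0 c0 fuel dm (dc - 1) acc'

def get_boat_at_left_new_states_alt (game_state : Int × Int × String × Int) :
    List (Int × Int × String × Int) :=
  pvGo game_state.1 game_state.2.1 9 2 0 []

-- ===== PRECONDITION & SPEC =====
def Spec_get_boat_at_left_new_states (game_state : Int × Int × String × Int) (out : List (Int × Int × String × Int)) : Prop := out = get_boat_at_left_new_states_alt game_state
instance (game_state : Int × Int × String × Int) (out : List (Int × Int × String × Int)) : Decidable (Spec_get_boat_at_left_new_states game_state out) := by unfold Spec_get_boat_at_left_new_states; infer_instance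

-- ===== CLAIM (what is proved, stated in full; the proofs are below) =====
def Claim_equal_get_boat_at_left_new_states : Prop := ∀ (game_state : Int × Int × String × Int), Dom_get_boat_at_left_new_states game_state → Spec_get_boat_at_left_new_states game_state (get_boat_at_left_new_states game_state)

-- ===== LEMMAS AND PROOFS =====

-- proof-side rephrasing of B as a left-to-right foldl over the five legal boat loads
def pvMoves : List (Int × Int) := [(0, 1), (0, 2), (1, 0), (1, 1), (2, 0)]

def pvFoldB (m0 c0 : Int) : List (Int × Int × String × Int) :=
  pvMoves.foldl (fun new_states mv =>
    let m := m0 + mv.1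
    let c := c0 + mv.2
    if m ≤ 3 ∧ c ≤ 3 ∧ ¬(0 < m ∧ m < c) ∧ ¬(0 < 3 - m ∧ 3 - m < 3 - c) then
      new_states ++ [(m, c, "right", m + c)]
    else new_states) []

set_option maxHeartbeats 1000000 in
theorem pv_B_eq_fold (m0 c0 : Int) : pvGo m0 c0 9 2 0 [] = pvFoldB m0 c0 := by
  rw [pvGo]; norm_num
  rw [pvGo]; norm_num
  rw [pvGo]; norm_num
  rw [pvGo]; norm_num
  rw [pvGo]; norm_num
  rw [pvGo]; norm_num
  rw [pvGo]; norm_num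
  rw [pvGo]; norm_num
  rw [pvGo]; norm_num
  simp only [pvFoldB, pvMoves, List.foldl]
  norm_num
  split_ifs <;> rfl

-- the test A's inner loop applies to a candidate move (dm, dc)
abbrev pvP (m c dm dc : Int) : Prop :=
  ¬(dm + dc < 1 ∨ dm + dc > 2) ∧
  ¬(0 < m + dm ∧ m + dm < c + dc) ∧
  ¬(0 < 3 - (m + dm) ∧ 3 - (m + dm) < 3 - (c + dc))

-- the state A appends for a passing move (dm, dc)
def pvF (m c dm dc : Int) : Int × Int × String × Int := (m + dm, c + dc, "right", m + dm + (c + dc))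

-- what A's inner loop (for a fixed dm) appends
def pvInner (m c dm : Int) : List (Int × Int × String × Int) :=
  ((PySem.List.pyRange 0 (3 - c + 1) 1).filter (fun dc => decide (pvP m c dm dc))).map (pvF m c dm)

theorem pv_inner_eq (m c dm : Int) (acc : List (Int × Int × String × Int)) :
    (PySem.List.pyRange 0 (3 - c + 1) 1).foldl (fun new_states cannibal =>
      if dm + cannibal < 1 ∨ dm + cannibal > 2 then new_states
      else
        let new_missionary := m + dm
        let new_cannibal := c + cannibal
        let new_state : Int × Int × String × Int :=
          (new_missionary, new_cannibal, "right", new_missionary + new_cannibal)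
        if 0 < new_state.1 ∧ new_state.1 < new_state.2.1 then new_states
        else if 0 < 3 - new_state.1 ∧ 3 - new_state.1 < 3 - new_state.2.1 then new_states
        else new_states ++ [new_state]) acc = acc ++ pvInner m c dm := by
  have hbody : (fun (new_states : List (Int × Int × String × Int)) (cannibal : Int) =>
      if dm + cannibal < 1 ∨ dm + cannibal > 2 then new_states
      else
        let new_missionary := m + dm
        let new_cannibal := c + cannibal
        let new_state : Int × Int × String × Int :=
          (new_missionary, new_cannibal, "right", new_missionary + new_cannibal)
        if 0 < new_state.1 ∧ new_state.1 < new_state.2.1 then new_states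
        else if 0 < 3 - new_state.1 ∧ 3 - new_state.1 < 3 - new_state.2.1 then new_states
        else new_states ++ [new_state])
      = fun acc dc => if pvP m c dm dc then acc ++ [pvF m c dm dc] else acc := by
    funext a dc
    simp only [pvP, pvF]
    split_ifs <;> first | rfl | (simp_all; omega) | simp_all
  rw [hbody, PySem.List.foldl_append_ite, pvInner]

theorem pv_A_flatMap (m c : Int) (s : String) (t : Int) :
    get_boat_at_left_new_states (m, c, s, t)
      = (PySem.List.pyRange 0 (3 - m + 1) 1).flatMap (pvInner m c) := by
  unfold get_boat_at_left_new_states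
  simp only
  calc (PySem.List.pyRange 0 (3 - m + 1) 1).foldl _ []
      = (PySem.List.pyRange 0 (3 - m + 1) 1).foldl (fun acc dm => acc ++ pvInner m c dm) [] :=
        PySem.List.foldl_congr_mem _ _ _ _ (fun acc dm _ => pv_inner_eq m c dm acc)
    _ = [] ++ (PySem.List.pyRange 0 (3 - m + 1) 1).flatMap (pvInner m c) :=
        PySem.List.foldl_append_eq_flatMap _ _ _
    _ = _ := List.nil_append _

theorem pv_filter_trunc (n : Int) (p : Int → Bool) (hp : ∀ x : Int, 3 ≤ x → p x = false) :
    (PySem.List.pyRange 0 n 1).filter p = (PySem.List.pyRange 0 (min n 3) 1).filter p := by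
  rcases le_or_gt n 3 with h | h
  · rw [min_eq_left h]
  · have h2 : List.filter p (PySem.List.pyRange 3 n 1) = [] := by
      rw [List.filter_eq_nil_iff]
      intro x hx
      simp [PySem.List.mem_pyRange_one] at hx
      simp [hp x hx.1]
    rw [min_eq_right (le_of_lt h), PySem.List.pyRange_one_append 0 3 n (by omega) (by omega),
      List.filter_append, h2, List.append_nil]

theorem pv_flatMap_trunc (n : Int) (g : Int → List (Int × Int × String × Int))
    (hg : ∀ x : Int, 3 ≤ x → g x = []) :
    (PySem.List.pyRange 0 n 1).flatMap g = (PySem.List.pyRange 0 (min n 3) 1).flatMap g := by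
  rcases le_or_gt n 3 with h | h
  · rw [min_eq_left h]
  · have h2 : List.flatMap g (PySem.List.pyRange 3 n 1) = [] := by
      rw [List.flatMap_eq_nil_iff]
      intro x hx
      simp [PySem.List.mem_pyRange_one] at hx
      exact hg x hx.1
    rw [min_eq_right (le_of_lt h), PySem.List.pyRange_one_append 0 3 n (by omega) (by omega),
      List.flatMap_append, h2, List.append_nil]

theorem pvInner_empty (m c dm : Int) (h : 3 ≤ dm) : pvInner m c dm = [] := by
  unfold pvInner
  rw [List.filter_eq_nil_iff.mpr, List.map_nil]
  intro dc hdc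
  simp [PySem.List.mem_pyRange_one] at hdc
  simp [pvP]
  omega

-- A's inner loop with its range capped at 3 (for 0 ≤ dm a larger dc never passes the sum test)
def pvInnerT (m c dm : Int) : List (Int × Int × String × Int) :=
  ((PySem.List.pyRange 0 (min (3 - c + 1) 3) 1).filter (fun dc => decide (pvP m c dm dc))).map (pvF m c dm)

theorem pvInner_trunc (m c dm : Int) (h : 0 ≤ dm) : pvInner m c dm = pvInnerT m c dm := by
  unfold pvInner pvInnerT
  rw [pv_filter_trunc]
  intro x hx
  simp [pvP]
  omega

set_option maxHeartbeats 2000000 in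
theorem pv_main (gs : Int × Int × String × Int) :
    get_boat_at_left_new_states gs = pvFoldB gs.1 gs.2.1 := by
  obtain ⟨m, c, s, t⟩ := gs
  rw [pv_A_flatMap, pv_flatMap_trunc _ _ (pvInner_empty m c)]
  rcases le_or_gt m 1 with hm | hm'
  · rw [show min (3 - m + 1) 3 = 3 from by omega,
      show PySem.List.pyRange 0 3 1 = [0, 1, 2] from by decide]
    simp only [List.flatMap_cons, List.flatMap_nil, List.append_nil]
    rw [pvInner_trunc m c 0 (by norm_num), pvInner_trunc m c 1 (by norm_num),
      pvInner_trunc m c 2 (by norm_num)]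
    simp only [pvInnerT]
    rcases le_or_gt c 1 with hc | hc'
    · rw [show min (3 - c + 1) 3 = 3 from by omega,
        show PySem.List.pyRange 0 3 1 = [0, 1, 2] from by decide]
      simp only [List.filter_cons, List.filter_nil, decide_eq_true_eq,
        pvFoldB, pvMoves, List.foldl, pvP]
      norm_num
      try simp only [show m ≤ (3:Int) from by omega, show m < (3:Int) from by omega, show m + 2 ≤ (3:Int) from by omega, show m + 1 < (3:Int) from by omega, show c ≤ (3:Int) from by omega, show c < (3:Int) from by omega, show c + 2 ≤ (3:Int) from by omega, true_and, true_implies, and_true, iff_true]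
      try split_ifs <;> first | (simp [pvF]; done) | omega | (simp [pvF]; omega) | simp_all [pvF]
      try simp [pvF]
      try omega
    · rcases le_or_gt c 3 with hc3 | hc4
      · have hcv : c = 2 ∨ c = 3 := by omega
        rcases hcv with hcv | hcv <;> subst hcv
        · rw [show min (3 - (2:Int) + 1) 3 = 2 from by decide,
            show PySem.List.pyRange 0 2 1 = [0, 1] from by decide]
          simp only [List.filter_cons, List.filter_nil, decide_eq_true_eq,
            pvFoldB, pvMoves, List.foldl, pvP]
          norm_num
          try simp only [show m ≤ (3:Int) from by omega, show m < (3:Int) from by omega, show m + 2 ≤ (3:Int) from by omega, show m + 1 < (3:Int) from by omega, true_and, true_implies, and_true, iff_true]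
          try split_ifs <;> first | (simp [pvF]; done) | omega | (simp [pvF]; omega) | simp_all [pvF]
          try simp [pvF]
          try omega
        · rw [show min (3 - (3:Int) + 1) 3 = 1 from by decide,
            show PySem.List.pyRange 0 1 1 = [0] from by decide]
          simp only [List.filter_cons, List.filter_nil, decide_eq_true_eq,
            pvFoldB, pvMoves, List.foldl, pvP]
          norm_num
          try simp only [show m ≤ (3:Int) from by omega, show m < (3:Int) from by omega, show m + 2 ≤ (3:Int) from by omega, show m + 1 < (3:Int) from by omega, true_and, true_implies, and_true, iff_true]
          try split_ifs <;> first | (simp [pvF]; done) | omega | (simp [pvF]; omega) | simp_all [pvF]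
          try simp [pvF]
          try omega
      · rw [PySem.List.pyRange_one_eq_nil (show min (3 - c + 1) 3 ≤ 0 from by omega)]
        simp only [List.filter_cons, List.filter_nil, decide_eq_true_eq,
          pvFoldB, pvMoves, List.foldl, pvP]
        norm_num
        try simp only [show m ≤ (3:Int) from by omega, show m < (3:Int) from by omega, show m + 2 ≤ (3:Int) from by omega, show m + 1 < (3:Int) from by omega, show ¬(c ≤ (3:Int)) from by omega, show ¬(c < (3:Int)) from by omega, show ¬(c + 2 ≤ (3:Int)) from by omega, true_and, true_implies, and_true, iff_true]
        try split_ifs <;> first | (simp [pvF]; done) | omega | (simp [pvF]; omega) | simp_all [pvF]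
        try simp [pvF]
        try omega
  · rcases le_or_gt m 3 with hm3 | hm4
    · have hmv : m = 2 ∨ m = 3 := by omega
      rcases hmv with hmv | hmv <;> subst hmv
      · rw [show min (3 - (2:Int) + 1) 3 = 2 from by decide,
          show PySem.List.pyRange 0 2 1 = [0, 1] from by decide]
        simp only [List.flatMap_cons, List.flatMap_nil, List.append_nil]
        rw [pvInner_trunc 2 c 0 (by norm_num), pvInner_trunc 2 c 1 (by norm_num)]
        simp only [pvInnerT]
        rcases le_or_gt c 1 with hc | hc'
        · rw [show min (3 - c + 1) 3 = 3 from by omega,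
            show PySem.List.pyRange 0 3 1 = [0, 1, 2] from by decide]
          simp only [List.filter_cons, List.filter_nil, decide_eq_true_eq,
            pvFoldB, pvMoves, List.foldl, pvP]
          norm_num
          try simp only [show c ≤ (3:Int) from by omega, show c < (3:Int) from by omega, show c + 2 ≤ (3:Int) from by omega, true_and, true_implies, and_true, iff_true]
          try split_ifs <;> first | (simp [pvF]; done) | omega | (simp [pvF]; omega) | simp_all [pvF]
          try simp [pvF]
          try omega
        · rcases le_or_gt c 3 with hc3 | hc4
          · have hcv : c = 2 ∨ c = 3 := by omega
            rcases hcv with hcv | hcv <;> subst hcv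
            · rw [show min (3 - (2:Int) + 1) 3 = 2 from by decide,
                show PySem.List.pyRange 0 2 1 = [0, 1] from by decide]
              simp only [List.filter_cons, List.filter_nil, decide_eq_true_eq,
                pvFoldB, pvMoves, List.foldl, pvP]
              norm_num
              try simp only [true_and, true_implies, and_true, iff_true]
              try split_ifs <;> first | (simp [pvF]; done) | omega | (simp [pvF]; omega) | simp_all [pvF]
              try simp [pvF]
              try omega
            · rw [show min (3 - (3:Int) + 1) 3 = 1 from by decide,
                show PySem.List.pyRange 0 1 1 = [0] from by decide]
              simp only [List.filter_cons, List.filter_nil, decide_eq_true_eq,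
                pvFoldB, pvMoves, List.foldl, pvP]
              norm_num
              try simp only [true_and, true_implies, and_true, iff_true]
              try split_ifs <;> first | (simp [pvF]; done) | omega | (simp [pvF]; omega) | simp_all [pvF]
              try simp [pvF]
              try omega
          · rw [PySem.List.pyRange_one_eq_nil (show min (3 - c + 1) 3 ≤ 0 from by omega)]
            simp only [List.filter_cons, List.filter_nil, decide_eq_true_eq,
              pvFoldB, pvMoves, List.foldl, pvP]
            norm_num
            try simp only [show ¬(c ≤ (3:Int)) from by omega, show ¬(c < (3:Int)) from by omega, show ¬(c + 2 ≤ (3:Int)) from by omega, true_and, true_implies, and_true, iff_true]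
            try split_ifs <;> first | (simp [pvF]; done) | omega | (simp [pvF]; omega) | simp_all [pvF]
            try simp [pvF]
            try omega
      · rw [show min (3 - (3:Int) + 1) 3 = 1 from by decide,
          show PySem.List.pyRange 0 1 1 = [0] from by decide]
        simp only [List.flatMap_cons, List.flatMap_nil, List.append_nil]
        rw [pvInner_trunc 3 c 0 (by norm_num)]
        simp only [pvInnerT]
        rcases le_or_gt c 1 with hc | hc'
        · rw [show min (3 - c + 1) 3 = 3 from by omega,
            show PySem.List.pyRange 0 3 1 = [0, 1, 2] from by decide]
          simp only [List.filter_cons, List.filter_nil, decide_eq_true_eq,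
            pvFoldB, pvMoves, List.foldl, pvP]
          norm_num
          try simp only [show c ≤ (3:Int) from by omega, show c < (3:Int) from by omega, show c + 2 ≤ (3:Int) from by omega, true_and, true_implies, and_true, iff_true]
          try split_ifs <;> first | (simp [pvF]; done) | omega | (simp [pvF]; omega) | simp_all [pvF]
          try simp [pvF]
          try omega
        · rcases le_or_gt c 3 with hc3 | hc4
          · have hcv : c = 2 ∨ c = 3 := by omega
            rcases hcv with hcv | hcv <;> subst hcv
            · rw [show min (3 - (2:Int) + 1) 3 = 2 from by decide,
                show PySem.List.pyRange 0 2 1 = [0, 1] from by decide]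
              simp only [List.filter_cons, List.filter_nil, decide_eq_true_eq,
                pvFoldB, pvMoves, List.foldl, pvP]
              norm_num
              try simp only [true_and, true_implies, and_true, iff_true]
              try split_ifs <;> first | (simp [pvF]; done) | omega | (simp [pvF]; omega) | simp_all [pvF]
              try simp [pvF]
              try omega
            · rw [show min (3 - (3:Int) + 1) 3 = 1 from by decide,
                show PySem.List.pyRange 0 1 1 = [0] from by decide]
              simp only [List.filter_cons, List.filter_nil, decide_eq_true_eq,
                pvFoldB, pvMoves, List.foldl, pvP]
              norm_num
              try simp only [true_and, true_implies, and_true, iff_true]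
              try split_ifs <;> first | (simp [pvF]; done) | omega | (simp [pvF]; omega) | simp_all [pvF]
              try simp [pvF]
              try omega
          · rw [PySem.List.pyRange_one_eq_nil (show min (3 - c + 1) 3 ≤ 0 from by omega)]
            simp only [List.filter_cons, List.filter_nil, decide_eq_true_eq,
              pvFoldB, pvMoves, List.foldl, pvP]
            norm_num
            try simp only [show ¬(c ≤ (3:Int)) from by omega, show ¬(c < (3:Int)) from by omega, show ¬(c + 2 ≤ (3:Int)) from by omega, true_and, true_implies, and_true, iff_true]
            try split_ifs <;> first | (simp [pvF]; done) | omega | (simp [pvF]; omega) | simp_all [pvF]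
            try simp [pvF]
            try omega
    · rw [PySem.List.pyRange_one_eq_nil (show min (3 - m + 1) 3 ≤ 0 from by omega),
        List.flatMap_nil]
      simp only [List.filter_cons, List.filter_nil, decide_eq_true_eq,
        pvFoldB, pvMoves, List.foldl, pvP]
      norm_num
      try simp only [show ¬(m ≤ (3:Int)) from by omega, show ¬(m < (3:Int)) from by omega, show ¬(m + 2 ≤ (3:Int)) from by omega, show ¬(m + 1 < (3:Int)) from by omega, true_and, true_implies, and_true, iff_true]
      try split_ifs <;> first | (simp [pvF]; done) | omega | (simp [pvF]; omega) | simp_all [pvF]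
      try simp [pvF]
      try omega

-- ===== VERDICT (by name: the statement is the Claim_ definition above) =====
theorem get_boat_at_left_new_states_spec : Claim_equal_get_boat_at_left_new_states := by
  intro gs _
  unfold Spec_get_boat_at_left_new_states get_boat_at_left_new_states_alt
  rw [pv_B_eq_fold]
  exact pv_main gs
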